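-- pv_equiv track=rewrite | github.com/yohan020/baekjoon | atcoder/daily_training/2026.02.05_MEDIUM/E.py | solve
-- ===== SOURCE A (Python) =====
-- def solve(N: int, M: int, A: str) -> int:
--     max_logo_needed = 0
--
--     current_plain = M
--     current_logo_used = 0
--
--     for plan in A:
--         if plan == '0':
--             current_plain = M
--             current_logo_used = 0
--         elif plan == '1':
--             if current_plain > 0:
--                 current_plain -= 1
--             else:
--                 current_logo_used += 1
--         elif plan == '2':
--             current_logo_used += 1
--         if current_logo_used > max_logo_needed:
--             max_logo_needed = current_logo_used
--     return max_logo_needed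
-- ===== SOURCE B (Python) =====
-- def solve(N: int, M: int, A: str) -> int:
--     # Segments between resets ('0'): within a segment logo usage only grows,
--     # so its peak is twos + max(0, ones - available plain shirts).
--     cap = M if M > 0 else 0
--     return max(seg.count('2') + max(0, seg.count('1') - cap)
--                for seg in A.split('0'))
-- ===== Notes on version B (the rewrite author's own statement) =====
-- stated objective: simpler
-- what changed: Replaces the per-character state-machine simulation (plain/logo counters plus a running max) by splitting the plan string at the '0' resets and computing each segment's peak logo need directly from its counts of '1' and '2'.
import Mathlib
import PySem

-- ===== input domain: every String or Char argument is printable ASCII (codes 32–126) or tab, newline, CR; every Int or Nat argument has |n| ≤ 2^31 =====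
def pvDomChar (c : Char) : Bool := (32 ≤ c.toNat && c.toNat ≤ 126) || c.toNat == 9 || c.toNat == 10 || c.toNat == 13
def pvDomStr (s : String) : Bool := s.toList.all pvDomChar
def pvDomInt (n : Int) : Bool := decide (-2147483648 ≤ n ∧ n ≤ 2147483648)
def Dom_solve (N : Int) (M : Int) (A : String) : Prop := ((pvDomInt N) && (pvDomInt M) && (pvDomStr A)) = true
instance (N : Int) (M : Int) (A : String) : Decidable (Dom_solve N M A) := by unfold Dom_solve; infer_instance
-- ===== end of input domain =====

-- B replaces A's per-character simulation by splitting the plan string at the '0' resets and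
-- computing each segment's peak logo need from its '1'/'2' counts (objective: simpler).

-- ===== PORT A =====
-- state = (max_logo_needed, current_plain, current_logo_used)
def solve (N : Int) (M : Int) (A : String) : Int :=
  (A.toList.foldl (fun (st : Int × Int × Int) plan =>
      let pl :=
        if plan == '0' then ((M : Int), (0 : Int))
        else if plan == '1' then
          (if st.2.1 > 0 then (st.2.1 - 1, st.2.2) else (st.2.1, st.2.2 + 1))
        else if plan == '2' then (st.2.1, st.2.2 + 1)
        else (st.2.1, st.2.2)
      if pl.2 > st.1 then (pl.2, pl.1, pl.2) else (st.1, pl.1, pl.2))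
    (0, M, 0)).1

-- ===== PORT B =====
def solve_alt (N : Int) (M : Int) (A : String) : Int :=
  let cap : Int := if M > 0 then M else 0
  let segs := (PySem.Str.split? A "0").getD []
  let vals := segs.map (fun seg =>
    ((PySem.Str.count seg "2" : Int)) + max 0 ((PySem.Str.count seg "1" : Int) - cap))
  match PySem.List.max? vals (fun v => v) with
  | some v => v
  | none => 0   -- unreachable: str.split always yields at least one piece

-- ===== PRECONDITION & SPEC =====
def Spec_solve (N : Int) (M : Int) (A : String) (out : Int) : Prop := out = solve_alt N M A
instance (N : Int) (M : Int) (A : String) (out : Int) : Decidable (Spec_solve N M A out) := by unfold Spec_solve; infer_instance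

-- ===== CLAIM (what is proved, stated in full; the proofs are below) =====
def Claim_equal_solve : Prop := ∀ (N : Int) (M : Int) (A : String), Dom_solve N M A → Spec_solve N M A (solve N M A)

-- ===== LEMMAS AND PROOFS =====

-- simple structural recursion equal to PySem.Chars.splitOn · ['0']
def pvSp : List Char → List (List Char)
  | [] => [[]]
  | c :: cs => if c = '0' then [] :: pvSp cs else (pvSp cs).modifyHead (c :: ·)

theorem pvSp_ne_nil (cs : List Char) : pvSp cs ≠ [] := by
  cases cs with
  | nil => simp [pvSp]
  | cons c cs =>
    simp only [pvSp]
    split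
    · simp
    · cases h : pvSp cs with
      | nil => exact absurd h (pvSp_ne_nil cs)
      | cons a t => simp [List.modifyHead]

theorem pvSplitOn_go_eq (l : List Char) : ∀ (fuel : Nat) (cur : List Char) (acc : List (List Char)),
    l.length ≤ fuel →
    PySem.Chars.splitOn.go ['0'] fuel l cur acc
      = acc.reverse ++ (pvSp l).modifyHead (cur.reverse ++ ·) := by
  induction l with
  | nil =>
    intro fuel cur acc _
    cases fuel <;> rw [PySem.Chars.splitOn.go] <;> simp [pvSp, List.modifyHead]
  | cons c rest ih =>
    intro fuel cur acc hf
    cases fuel with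
    | zero => simp at hf
    | succ f =>
      rw [PySem.Chars.splitOn.go]
      by_cases hc : c = '0'
      · subst hc
        simp only [List.isPrefixOf, BEq.rfl, Bool.true_and, if_pos,
          List.length_singleton, List.drop_one, List.tail_cons]
        rw [ih f [] (cur.reverse :: acc) (by simpa using hf)]
        simp [pvSp]
        cases h : pvSp rest with
        | nil => exact absurd h (pvSp_ne_nil rest)
        | cons a t => simp [List.modifyHead]
      · have hpre : (['0'].isPrefixOf (c :: rest)) = false := by
          simp [List.isPrefixOf]; exact fun h => absurd h.symm hc
        rw [hpre]
        simp only [Bool.false_eq_true, if_false]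
        rw [ih f (c :: cur) acc (by simpa using Nat.le_of_succ_le_succ hf)]
        simp only [pvSp, if_neg hc]
        cases h : pvSp rest with
        | nil => exact absurd h (pvSp_ne_nil rest)
        | cons a t => simp [List.modifyHead]

theorem pvSplitOn_eq (l : List Char) : PySem.Chars.splitOn l ['0'] = pvSp l := by
  unfold PySem.Chars.splitOn
  rw [pvSplitOn_go_eq l (l.length + 1) [] [] (Nat.le_succ _)]
  cases h : pvSp l with
  | nil => exact absurd h (pvSp_ne_nil l)
  | cons a t => simp [List.modifyHead]

theorem pvCount_go_eq (d : Char) (l : List Char) : ∀ (fuel acc : Nat), l.length ≤ fuel →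
    PySem.Chars.count.go [d] fuel l acc = acc + l.count d := by
  induction l with
  | nil => intro fuel acc _; cases fuel <;> rw [PySem.Chars.count.go] <;> simp
  | cons c rest ih =>
    intro fuel acc hf
    cases fuel with
    | zero => simp at hf
    | succ f =>
      rw [PySem.Chars.count.go]
      by_cases hc : c = d
      · subst hc
        simp only [List.isPrefixOf, BEq.rfl, Bool.true_and, if_pos,
          List.length_singleton, List.drop_one, List.tail_cons]
        rw [ih f (acc + 1) (by simpa using hf)]
        simp
        omega
      · have hpre : ([d].isPrefixOf (c :: rest)) = false := by
          simp [List.isPrefixOf]; exact fun h => absurd h.symm hc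
        rw [hpre]
        simp only [Bool.false_eq_true, if_false]
        rw [ih f acc (by simpa using Nat.le_of_succ_le_succ hf)]
        simp [hc]

theorem pvCount_single (l : List Char) (d : Char) : PySem.Chars.count l [d] = l.count d := by
  unfold PySem.Chars.count
  simp only [List.isEmpty_cons, Bool.false_eq_true, if_false]
  simpa using pvCount_go_eq d l l.length 0 (Nat.le_refl _)

-- segment value: logo shirts used by the end of a segment started with l logos used and p plain left
def pvVal (p l : Int) (seg : List Char) : Int :=
  l + (seg.count '2' : Int) + max 0 ((seg.count '1' : Int) - max p 0)

-- maximum logo usage from the current point on, given plain p and logo l (M = reset stock)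
def pvF (M : Int) : List Char → Int → Int → Int
  | [], _, l => l
  | c :: cs, p, l =>
    if c = '0' then max l (pvF M cs M 0)
    else if c = '1' then (if 0 < p then pvF M cs (p - 1) l else pvF M cs p (l + 1))
    else if c = '2' then pvF M cs p (l + 1)
    else pvF M cs p l

theorem pvF_ge (M : Int) (cs : List Char) : ∀ p l, l ≤ pvF M cs p l := by
  induction cs with
  | nil => intro p l; simp [pvF]
  | cons c cs ih =>
    intro p l
    simp only [pvF]
    split_ifs with h0 h1 hp h2
    · exact le_max_left _ _
    · exact ih _ _
    · exact le_trans (by omega) (ih p (l + 1))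
    · exact le_trans (by omega) (ih p (l + 1))
    · exact ih _ _

theorem pvFoldlMaxComm (t : List Int) : ∀ a b : Int, max a (t.foldl max b) = t.foldl max (max a b) := by
  induction t with
  | nil => intro a b; rfl
  | cons x t ih =>
    intro a b
    simp only [List.foldl_cons]
    rw [ih a (max b x), max_assoc]

theorem pvMainFold (M : Int) (cs : List Char) : ∀ (p l m : Int), 0 ≤ m → l ≤ m →
    (cs.foldl (fun (st : Int × Int × Int) plan =>
      let pl :=
        if plan == '0' then ((M : Int), (0 : Int))
        else if plan == '1' then
          (if st.2.1 > 0 then (st.2.1 - 1, st.2.2) else (st.2.1, st.2.2 + 1))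
        else if plan == '2' then (st.2.1, st.2.2 + 1)
        else (st.2.1, st.2.2)
      if pl.2 > st.1 then (pl.2, pl.1, pl.2) else (st.1, pl.1, pl.2)) (m, p, l)).1
    = max m (pvF M cs p l) := by
  induction cs with
  | nil => intro p l m h0 hl; simp [pvF]; omega
  | cons c cs ih =>
    intro p l m h0 hl
    simp only [List.foldl_cons]
    by_cases hc0 : c = '0'
    · subst hc0
      simp only [beq_self_eq_true, if_pos]
      have : ¬ ((0 : Int) > m) := by omega
      simp only [this, if_false]
      rw [ih M 0 m h0 (by omega)]
      have hF : pvF M ('0' :: cs) p l = max l (pvF M cs M 0) := by simp [pvF]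
      rw [hF]
      omega
    · have hb0 : (c == '0') = false := by simp [hc0]
      by_cases hc1 : c = '1'
      · subst hc1
        simp only [hb0, Bool.false_eq_true, if_false, beq_self_eq_true, if_pos]
        by_cases hp : p > 0
        · have hF : pvF M ('1' :: cs) p l = pvF M cs (p - 1) l := by simp [pvF, hp]
          simp only [hp, if_pos]
          have : ¬ (l > m) := by omega
          simp only [this, if_false]
          rw [ih (p - 1) l m h0 hl, hF]
        · have hF : pvF M ('1' :: cs) p l = pvF M cs p (l + 1) := by simp [pvF, hp]
          simp only [hp, if_false]
          have hstep : (if l + 1 > m then ((l + 1 : Int), p, l + 1) else (m, p, l + 1))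
              = (max m (l + 1), p, l + 1) := by
            split_ifs with h <;> simp <;> omega
          rw [hstep, ih p (l + 1) (max m (l + 1)) (by omega) (by omega), hF]
          have hge := pvF_ge M cs p (l + 1)
          omega
      · have hb1 : (c == '1') = false := by simp [hc1]
        by_cases hc2 : c = '2'
        · subst hc2
          have hF : pvF M ('2' :: cs) p l = pvF M cs p (l + 1) := by simp [pvF]
          simp only [hb0, hb1, Bool.false_eq_true, if_false, beq_self_eq_true, if_pos]
          have hstep : (if l + 1 > m then ((l + 1 : Int), p, l + 1) else (m, p, l + 1))
              = (max m (l + 1), p, l + 1) := by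
            split_ifs with h <;> simp <;> omega
          rw [hstep, ih p (l + 1) (max m (l + 1)) (by omega) (by omega), hF]
          have hge := pvF_ge M cs p (l + 1)
          omega
        · have hb2 : (c == '2') = false := by simp [hc2]
          have hF : pvF M (c :: cs) p l = pvF M cs p l := by simp [pvF, hc0, hc1, hc2]
          simp only [hb0, hb1, hb2, Bool.false_eq_true, if_false]
          have : ¬ (l > m) := by omega
          simp only [this, if_false]
          rw [ih p l m h0 hl, hF]

theorem pvF_eq_seg (M : Int) (cs : List Char) : ∀ p l,
    pvF M cs p l = ((pvSp cs).tail.map (pvVal M 0)).foldl max (pvVal p l (pvSp cs).headI) := by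
  induction cs with
  | nil => intro p l; simp [pvF, pvSp, pvVal]
  | cons c cs ih =>
    intro p l
    by_cases hc0 : c = '0'
    · subst hc0
      have hF : pvF M ('0' :: cs) p l = max l (pvF M cs M 0) := by simp [pvF]
      have hsp : pvSp ('0' :: cs) = [] :: pvSp cs := by simp [pvSp]
      rw [hF, hsp, ih M 0]
      cases h : pvSp cs with
      | nil => exact absurd h (pvSp_ne_nil cs)
      | cons s t =>
        simp only [List.headI_cons, List.tail_cons, List.map_cons, List.foldl_cons]
        rw [pvFoldlMaxComm]
        have hvl : pvVal p l [] = l := by simp [pvVal]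
        rw [hvl]
    · cases h : pvSp cs with
      | nil => exact absurd h (pvSp_ne_nil cs)
      | cons s t =>
        have hsp : pvSp (c :: cs) = (c :: s) :: t := by
          simp [pvSp, if_neg hc0, h]
        rw [hsp]
        simp only [List.headI_cons, List.tail_cons]
        by_cases hc1 : c = '1'
        · subst hc1
          by_cases hp : (0 : Int) < p
          · have hF : pvF M ('1' :: cs) p l = pvF M cs (p - 1) l := by simp [pvF, hp]
            rw [hF, ih (p - 1) l, h]
            simp only [List.headI_cons, List.tail_cons]
            have hv : pvVal p l ('1' :: s) = pvVal (p - 1) l s := by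
              simp only [pvVal, List.count_cons, BEq.rfl, if_pos]
              have h1 : (((s.count '1' : Nat) + 1 : Nat) : Int) = (s.count '1' : Int) + 1 := by push_cast; ring
              have h2 : (if ('1' : Char) == '2' then 1 else 0) = 0 := by decide
              simp only [h2, Nat.add_zero, h1]
              omega
            rw [hv]
          · have hF : pvF M ('1' :: cs) p l = pvF M cs p (l + 1) := by simp [pvF, hp]
            rw [hF, ih p (l + 1), h]
            simp only [List.headI_cons, List.tail_cons]
            have hv : pvVal p l ('1' :: s) = pvVal p (l + 1) s := by
              simp only [pvVal, List.count_cons, BEq.rfl, if_pos]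
              have h1 : (((s.count '1' : Nat) + 1 : Nat) : Int) = (s.count '1' : Int) + 1 := by push_cast; ring
              have h2 : (if ('1' : Char) == '2' then 1 else 0) = 0 := by decide
              simp only [h2, Nat.add_zero, h1]
              have : (0 : Int) ≤ (s.count '1' : Int) := by positivity
              omega
            rw [hv]
        · by_cases hc2 : c = '2'
          · subst hc2
            have hF : pvF M ('2' :: cs) p l = pvF M cs p (l + 1) := by simp [pvF]
            rw [hF, ih p (l + 1), h]
            simp only [List.headI_cons, List.tail_cons]
            have hv : pvVal p l ('2' :: s) = pvVal p (l + 1) s := by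
              simp only [pvVal, List.count_cons, BEq.rfl, if_pos]
              have h2 : (if ('2' : Char) == '1' then 1 else 0) = 0 := by decide
              have h1 : (((s.count '2' : Nat) + 1 : Nat) : Int) = (s.count '2' : Int) + 1 := by push_cast; ring
              simp only [h2, Nat.add_zero, h1]
              omega
            rw [hv]
          · have hF : pvF M (c :: cs) p l = pvF M cs p l := by simp [pvF, hc0, hc1, hc2]
            rw [hF, ih p l, h]
            simp only [List.headI_cons, List.tail_cons]
            have hv : pvVal p l (c :: s) = pvVal p l s := by
              simp [pvVal, hc1, hc2]
            rw [hv]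

-- ===== VERDICT (by name: the statement is the Claim_ definition above) =====
theorem solve_spec : Claim_equal_solve := by
  intro N M A _
  unfold Spec_solve solve solve_alt
  set l := A.toList with hl
  -- A side
  rw [pvMainFold M l M 0 0 le_rfl le_rfl, pvF_eq_seg M l M 0]
  -- B side: identify the split
  have hsplit : PySem.Str.split? A "0" = some ((pvSp l).map (fun t => String.ofList t)) := by
    have h := PySem.Str.split?_map A "0"
    have h2 : PySem.Chars.split? A.toList "0".toList = some (PySem.Chars.splitOn A.toList ['0']) := by
      simp [PySem.Chars.split?]
    rw [h2, pvSplitOn_eq] at h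
    cases hx : PySem.Str.split? A "0" with
    | none => rw [hx] at h; simp at h
    | some ss =>
      rw [hx] at h
      simp only [Option.map_some, Option.some.injEq] at h
      congr 1
      rw [← h, List.map_map]
      apply List.ext_getElem (by simp)
      intro i h1 h2
      simp [String.ofList_toList]
  rw [hsplit]
  simp only [Option.getD_some, List.map_map]
  have hcap : (if M > 0 then M else (0 : Int)) = max M 0 := by split_ifs <;> omega
  have hmapeq : ((pvSp l).map ((fun seg =>
        ((PySem.Str.count seg "2" : Int)) + max 0 ((PySem.Str.count seg "1" : Int) -
          (if M > 0 then M else 0))) ∘ (fun t => String.ofList t)))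
      = (pvSp l).map (pvVal M 0) := by
    apply List.map_congr_left
    intro t _
    simp only [Function.comp, PySem.Str.count_eq, hcap]
    rw [String.toList_ofList]
    have e2 := pvCount_single t '2'
    have e1 := pvCount_single t '1'
    have hx2 : PySem.Chars.count t "2".toList = t.count '2' := by simpa using e2
    have hx1 : PySem.Chars.count t "1".toList = t.count '1' := by simpa using e1
    rw [hx2, hx1]
    simp [pvVal]
  rw [hmapeq]
  cases h : pvSp l with
  | nil => exact absurd h (pvSp_ne_nil l)
  | cons s t =>
    simp only [List.map_cons, List.headI_cons, List.tail_cons]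
    rw [PySem.List.max?_id_cons]
    have hred : ∀ X : Int, (match some X with | some v => v | none => (0:Int)) = X := fun _ => rfl
    rw [hred]
    have hge : pvVal M 0 s ≤ (t.map (pvVal M 0)).foldl max (pvVal M 0 s) :=
      (PySem.List.le_foldl_max (t.map (pvVal M 0)) (pvVal M 0 s)).1
    have hv0 : 0 ≤ pvVal M 0 s := by
      simp only [pvVal]
      have : (0 : Int) ≤ (s.count '2' : Int) := by positivity
      have : (0 : Int) ≤ max 0 ((s.count '1' : Int) - max M 0) := le_max_left _ _
      omega
    omega
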